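-- pv_equiv track=rewrite | github.com/adderbenev/mrmouse_poetry | bears_at_large.py | join_with_newline
-- ===== SOURCE A (Python) =====
-- def join_with_newline(strings):
--     joined_string = ''
--     for i, string in enumerate(strings, 1):
--         joined_string += string
--         if i % 6 == 0:
--             joined_string += '\n'
--         else:
--             joined_string += ' '
--     return joined_string.strip()
-- ===== SOURCE B (Python) =====
-- def join_with_newline(strings):
--     items = list(strings)
--     n = len(items)
--     lines = []
--     i = 0
--     while i < n:
--         lines.append(' '.join(items[i:i+6]))
--         i += 6
--     return '\n'.join(lines).strip()
-- ===== Notes on version B (the rewrite author's own statement) =====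
-- stated objective: simpler
-- what changed: Replaces the per-element accumulation with an i%6 separator branch by grouping the list into chunks of 6 and using two-level str.join (space inside a chunk, newline between chunks), with the same final strip.
import Mathlib
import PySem

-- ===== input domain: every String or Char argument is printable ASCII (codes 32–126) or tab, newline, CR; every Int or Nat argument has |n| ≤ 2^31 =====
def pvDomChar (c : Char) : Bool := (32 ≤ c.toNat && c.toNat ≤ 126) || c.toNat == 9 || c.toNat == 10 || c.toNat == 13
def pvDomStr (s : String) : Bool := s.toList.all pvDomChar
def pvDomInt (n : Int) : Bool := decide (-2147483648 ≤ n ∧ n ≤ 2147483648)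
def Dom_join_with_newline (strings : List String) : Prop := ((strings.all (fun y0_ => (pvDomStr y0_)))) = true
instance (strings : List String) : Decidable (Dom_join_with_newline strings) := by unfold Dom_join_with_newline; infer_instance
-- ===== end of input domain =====

-- B joins chunks of 6 with two-level str.join instead of A's per-element accumulation
-- with an i%6 separator branch; same return value, objective: simpler.

-- ===== PORT A =====
def join_with_newline (strings : List String) : String :=
  let joined_string := (PySem.List.enumerate strings 1).foldl
    (fun acc p =>
      let acc := acc ++ p.2
      if PySem.Int.mod p.1 6 == 0 then acc ++ "\n" else acc ++ " ")
    ""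
  PySem.Str.strip joined_string

-- ===== PORT B =====
-- the 'while i < n:' loop of Source B: one line per chunk of 6 (items[i:i+6] is a slice)
def pvLinesB (items : List String) (n i : Int) : List String :=
  if i < n then
    PySem.Str.join " " (PySem.List.slice items (some i) (some (i + 6))) ::
      pvLinesB items n (i + 6)
  else []
termination_by (n - i).toNat
decreasing_by rename_i h; omega

def join_with_newline_alt (strings : List String) : String :=
  PySem.Str.strip (PySem.Str.join "\n" (pvLinesB strings (strings.length : Int) 0))

-- ===== PRECONDITION & SPEC =====
def Spec_join_with_newline (strings : List String) (out : String) : Prop := out = join_with_newline_alt strings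
instance (strings : List String) (out : String) : Decidable (Spec_join_with_newline strings out) := by unfold Spec_join_with_newline; infer_instance

-- ===== CLAIM (what is proved, stated in full; the proofs are below) =====
def Claim_equal_join_with_newline : Prop := ∀ (strings : List String), Dom_join_with_newline strings → Spec_join_with_newline strings (join_with_newline strings)

-- ===== LEMMAS AND PROOFS =====

/-- A's loop over char lists: element, then '\n' if the (1-based) index is ≡ 0 mod 6, else ' '. -/
def gA : List (List Char) → Nat → List Char
  | [], _ => []
  | s :: t, n => s ++ (if n % 6 = 0 then ['\n'] else [' ']) ++ gA t (n + 1)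

/-- B's chunking on char lists. -/
def linesC (l : List (List Char)) : List (List Char) :=
  if l = [] then []
  else PySem.Chars.join [' '] (l.take 6) :: linesC (l.drop 6)
termination_by l.length
decreasing_by
  rename_i h
  cases l with
  | nil => exact absurd rfl h
  | cons a t => simp

theorem foldA (l : List String) (n : Nat) (acc : String) :
    ((PySem.List.enumerate l (n : Int)).foldl
      (fun acc p =>
        let acc := acc ++ p.2
        if PySem.Int.mod p.1 6 == 0 then acc ++ "\n" else acc ++ " ") acc).toList
    = acc.toList ++ gA (l.map String.toList) n := by
  induction l generalizing n acc with
  | nil => simp [PySem.List.enumerate, gA]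
  | cons s t ih =>
    rw [PySem.List.enumerate_cons]
    simp only [List.foldl_cons]
    have hmod : PySem.Int.mod (n : Int) 6 = ((n % 6 : Nat) : Int) := by
      simp [PySem.Int.mod, Int.fmod_eq_emod]
    have hcast : ((n : Int) + 1) = ((n + 1 : Nat) : Int) := by push_cast; ring
    rw [hmod, hcast]
    by_cases h : n % 6 = 0
    · have hb : (((n % 6 : Nat) : Int) == 0) = true := by simp [h]
      simp only [hb, if_true, ih]
      simp [gA, h]
    · have hb : (((n % 6 : Nat) : Int) == 0) = false := by
        rw [beq_eq_false_iff_ne]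
        intro hcontra
        exact h (by exact_mod_cast hcontra)
      simp only [hb, Bool.false_eq_true, if_false, ih]
      simp [gA, h]

theorem gA_shift (l : List (List Char)) (n : Nat) : gA l (n + 6) = gA l n := by
  induction l generalizing n with
  | nil => rfl
  | cons s t ih =>
    have hm : (n + 6) % 6 = n % 6 := by omega
    simp only [gA, hm, Nat.add_right_comm n 6 1, ih]

theorem gA_append (x y : List (List Char)) (n : Nat) :
    gA (x ++ y) n = gA x n ++ gA y (n + x.length) := by
  induction x generalizing n with
  | nil => simp [gA]
  | cons s t ih =>
    have hn : n + (t.length + 1) = (n + 1) + t.length := by omega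
    simp [gA, ih, List.append_assoc, hn]

theorem gA_small (c : List (List Char)) (h0 : c ≠ []) (h6 : c.length ≤ 6) :
    gA c 1 = PySem.Chars.join [' '] c ++ (if c.length = 6 then ['\n'] else [' ']) := by
  rcases c with _ | ⟨a, _ | ⟨b, _ | ⟨c3, _ | ⟨d, _ | ⟨e, _ | ⟨f, _ | ⟨x, t⟩⟩⟩⟩⟩⟩⟩
  · exact absurd rfl h0
  · simp [gA, PySem.Chars.join_singleton]
  · simp [gA, PySem.Chars.join_cons_cons, PySem.Chars.join_singleton]
  · simp [gA, PySem.Chars.join_cons_cons, PySem.Chars.join_singleton]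
  · simp [gA, PySem.Chars.join_cons_cons, PySem.Chars.join_singleton]
  · simp [gA, PySem.Chars.join_cons_cons, PySem.Chars.join_singleton]
  · simp [gA, PySem.Chars.join_cons_cons, PySem.Chars.join_singleton]
  · simp only [List.length_cons] at h6; omega

theorem linesC_cons (l : List (List Char)) (h : l ≠ []) :
    linesC l = PySem.Chars.join [' '] (l.take 6) :: linesC (l.drop 6) := by
  rw [linesC]; simp [h]

theorem gA_main (l : List (List Char)) (h : l ≠ []) :
    gA l 1 = PySem.Chars.join ['\n'] (linesC l)
      ++ (if l.length % 6 = 0 then ['\n'] else [' ']) := by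
  by_cases hr : l.drop 6 = []
  · have h6 : l.length ≤ 6 := by
      have := List.length_drop (l := l) (i := 6); rw [hr] at this; simp at this; omega
    rw [linesC_cons l h, hr, linesC]
    have htake : l.take 6 = l := List.take_of_length_le h6
    rw [if_pos rfl, htake, PySem.Chars.join_singleton, gA_small l h h6]
    have hiff : l.length % 6 = 0 ↔ l.length = 6 := by
      have h1 : 1 ≤ l.length := List.length_pos_iff.mpr h
      omega
    by_cases hl : l.length = 6 <;> simp [hl, hiff]
  · have h6 : 6 ≤ l.length := by
      by_contra hlt
      exact hr (List.drop_eq_nil_of_le (by omega))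
    have hsplit : l = l.take 6 ++ l.drop 6 := (List.take_append_drop 6 l).symm
    have htl : (l.take 6).length = 6 := by simp [h6]
    have hrlen : l.length = (l.drop 6).length + 6 := by simp; omega
    have ih := gA_main (l.drop 6) hr
    have hlines : linesC (l.drop 6) = PySem.Chars.join [' '] ((l.drop 6).take 6) :: linesC ((l.drop 6).drop 6) :=
      linesC_cons (l.drop 6) hr
    calc gA l 1 = gA (l.take 6 ++ l.drop 6) 1 := by rw [← hsplit]
      _ = gA (l.take 6) 1 ++ gA (l.drop 6) (1 + 6) := by rw [gA_append, htl]
      _ = gA (l.take 6) 1 ++ gA (l.drop 6) 1 := by rw [Nat.add_comm 1 6, gA_shift]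
      _ = (PySem.Chars.join [' '] (l.take 6) ++ ['\n']) ++ gA (l.drop 6) 1 := by
            rw [gA_small (l.take 6) (by simp; omega) (le_of_eq htl), htl, if_pos rfl]
      _ = _ := by
            rw [ih, linesC_cons l h, hlines, PySem.Chars.join_cons_cons, ← hlines]
            have hmod : l.length % 6 = (l.drop 6).length % 6 := by omega
            rw [hmod]
            simp [List.append_assoc]
termination_by l.length
decreasing_by cases l with
  | nil => exact absurd rfl h
  | cons a t => simp

theorem strip_append_ws (x : List Char) (c : Char) (hc : PySem.Chars.isspace c = true) :
    PySem.Chars.strip (x ++ [c]) = PySem.Chars.strip x := by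
  unfold PySem.Chars.strip PySem.Chars.lstrip PySem.Chars.rstrip
  rw [List.dropWhile_append]
  by_cases h : (List.dropWhile PySem.Chars.isspace x).isEmpty
  · rw [if_pos h]
    rw [List.isEmpty_iff] at h
    simp [h, hc]
  · rw [if_neg h]
    simp [List.reverse_append, hc]

/-- B's Lean chunking matches linesC through toList. -/
theorem pvLinesB_toList (items : List String) (k : Nat) :
    (pvLinesB items (items.length : Int) (k : Int)).map String.toList
      = linesC ((items.drop k).map String.toList) := by
  rw [pvLinesB, linesC]
  by_cases h : (k : Int) < (items.length : Int)
  · have hk : k < items.length := by exact_mod_cast h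
    rw [if_pos h, if_neg (by simp [List.drop_eq_nil_iff]; omega)]
    have hslice : PySem.List.slice items (some (k : Int)) (some ((k : Int) + 6))
        = (items.drop k).take 6 := by
      have := PySem.List.slice_natCast_add (xs := items) (j := k) (n := 6)
      simpa using this
    have hcast : ((k : Int) + 6) = ((k + 6 : Nat) : Int) := by push_cast; ring
    have ih := pvLinesB_toList items (k + 6)
    have hsp : (" " : String).toList = [' '] := rfl
    rw [hslice, hcast]
    simp only [List.map_cons, PySem.Str.toList_join, hsp, ih, List.drop_drop,
      List.map_drop, List.map_take]
  · have hk : items.length ≤ k := by omega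
    rw [if_neg h, if_pos (by simp [List.drop_eq_nil_iff]; omega)]
    simp
termination_by items.length - k
decreasing_by omega

-- ===== VERDICT (by name: the statement is the Claim_ definition above) =====
theorem join_with_newline_spec : Claim_equal_join_with_newline := by
  intro strings _
  unfold Spec_join_with_newline join_with_newline join_with_newline_alt
  apply String.ext
  show (PySem.Str.strip _).toList = (PySem.Str.strip _).toList
  rw [PySem.Str.toList_strip, PySem.Str.toList_strip, PySem.Str.toList_join]
  have hB := pvLinesB_toList strings 0
  rw [Nat.cast_zero, List.drop_zero] at hB
  rw [hB]
  by_cases h : strings = []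
  · subst h
    simp [PySem.List.enumerate, linesC, PySem.Chars.join, List.intercalate]
  · have hfold := foldA strings 1 ""
    rw [Nat.cast_one] at hfold
    simp only [show ("" : String).toList = [] from rfl, List.nil_append] at hfold
    rw [hfold, gA_main (strings.map String.toList) (by simpa using h)]
    rw [show ("\n" : String).toList = ['\n'] from rfl]
    by_cases hm : (strings.map String.toList).length % 6 = 0
    · rw [if_pos hm]; exact strip_append_ws _ _ (by decide)
    · rw [if_neg hm]; exact strip_append_ws _ _ (by decide)
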